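-- pv_equiv track=rewrite | github.com/smiyawaki0820/qasrl-crowdsourcing | py_scripts/evaluate/argument_first_evaluation.py | is_full_arg_match
-- ===== SOURCE A (Python) =====
-- from typing import Tuple, List, Set, Dict, Generator
--
-- Argument = Tuple[int, int]
--
-- def is_full_arg_match(grt_args: List[Argument],
--                       sys_args: List[Argument],
--                       sys_to_grt: Dict[Argument, Argument]):
--
--     if len(grt_args) != len(sys_args):
--         return False
--     # how many GRT args are aligned with SYS args?
--     # Assume matches does not contain duplicate alignments.
--     grt_arg_set = set(grt_args)
--     for sys_arg in sys_args:
--         matched_grt_arg = sys_to_grt.get(sys_arg)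
--         if matched_grt_arg not in grt_arg_set:
--             return False
--         else:
--             # so we would not match an item twice, jsut in case
--             grt_arg_set.remove(matched_grt_arg)
--
--     # All arguments in both roles were aligned
--     return True
-- ===== SOURCE B (Python) =====
-- def is_full_arg_match(grt_args, sys_args, sys_to_grt):
--     if len(grt_args) != len(sys_args):
--         return False
--     # map every sys arg through the alignment in one pass, then judge in aggregate:
--     # the mapping must be injective and land inside the ground-truth set
--     # (a missing key yields None, which fails the subset test).
--     matched = [sys_to_grt.get(s) for s in sys_args]
--     return len(set(matched)) == len(matched) and set(matched) <= set(grt_args)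
-- ===== Notes on version B (the rewrite author's own statement) =====
-- stated objective: simpler
-- what changed: Replaces A's incremental check-and-remove loop over a mutable ground-truth set with one aggregate pass that maps all sys args through the alignment and then judges by two set comparisons: the mapped list is duplicate-free and a subset of the ground-truth set.
import Mathlib
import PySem

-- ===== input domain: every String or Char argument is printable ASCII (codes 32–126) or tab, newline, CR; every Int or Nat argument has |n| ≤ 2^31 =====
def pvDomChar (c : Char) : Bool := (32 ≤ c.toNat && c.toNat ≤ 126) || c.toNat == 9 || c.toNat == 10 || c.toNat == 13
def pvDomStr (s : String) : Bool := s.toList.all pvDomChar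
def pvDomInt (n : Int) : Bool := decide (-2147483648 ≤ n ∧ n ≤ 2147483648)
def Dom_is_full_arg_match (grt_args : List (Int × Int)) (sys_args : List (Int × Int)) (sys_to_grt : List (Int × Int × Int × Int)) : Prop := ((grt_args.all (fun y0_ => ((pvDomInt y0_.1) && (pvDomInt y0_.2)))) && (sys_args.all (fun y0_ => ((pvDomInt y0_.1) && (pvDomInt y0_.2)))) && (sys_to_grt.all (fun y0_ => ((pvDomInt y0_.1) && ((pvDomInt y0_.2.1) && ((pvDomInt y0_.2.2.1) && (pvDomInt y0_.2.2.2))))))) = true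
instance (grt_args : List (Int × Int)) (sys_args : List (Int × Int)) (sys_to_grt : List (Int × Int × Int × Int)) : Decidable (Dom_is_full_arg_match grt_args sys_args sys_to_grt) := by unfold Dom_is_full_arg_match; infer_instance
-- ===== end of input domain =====

-- ===== PORT A =====
-- B is a different decomposition: one aggregate pass + two set comparisons instead of A's
-- incremental check-and-remove loop; equivalence of return values is proved below.
-- shared input primitive: sys_to_grt.get(k) on the association list (first match), used by both Pythons
def pvGet (d : List (Int × Int × Int × Int)) (k : Int × Int) : Option (Int × Int) :=
  match d with
  | [] => none
  | q :: rest => if (q.1, q.2.1) = k then some (q.2.2.1, q.2.2.2) else pvGet rest k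

-- A's for-loop: look up each sys arg, require membership in the remaining grt set, remove it
-- (the element is present at removal time, so Python's set.remove = Set.discard here)
def pvLoopA (d : List (Int × Int × Int × Int)) (ss : List (Int × Int))
    (s : PySem.Set (Int × Int)) : Bool :=
  match ss with
  | [] => true
  | a :: rest =>
    match pvGet d a with
    | none => false
    | some g => if g ∈ s then pvLoopA d rest (s.discard g) else false

def is_full_arg_match (grt_args : List (Int × Int)) (sys_args : List (Int × Int)) (sys_to_grt : List (Int × Int × Int × Int)) : Bool :=
  if grt_args.length ≠ sys_args.length then false
  else pvLoopA sys_to_grt sys_args (PySem.Set.ofList grt_args)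

-- ===== PORT B =====
-- Source B: matched = [sys_to_grt.get(s) for s in sys_args];
-- len(set(matched)) == len(matched) and set(matched) <= set(grt_args).
-- Python compares Optional values against tuples (None equals no tuple); in Lean the subset
-- test is typed by lifting grt_args through `some`, which is exact for that comparison.
def is_full_arg_match_alt (grt_args : List (Int × Int)) (sys_args : List (Int × Int)) (sys_to_grt : List (Int × Int × Int × Int)) : Bool :=
  if grt_args.length ≠ sys_args.length then false
  else
    let matched := sys_args.map (fun s => pvGet sys_to_grt s)
    let ms : PySem.Set (Option (Int × Int)) := PySem.Set.ofList matched
    (ms.length == matched.length) && PySem.Set.issubset ms (PySem.Set.ofList (grt_args.map some))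
-- ===== PRECONDITION & SPEC =====
def Spec_is_full_arg_match (grt_args : List (Int × Int)) (sys_args : List (Int × Int)) (sys_to_grt : List (Int × Int × Int × Int)) (out : Bool) : Prop := out = is_full_arg_match_alt grt_args sys_args sys_to_grt
instance (grt_args : List (Int × Int)) (sys_args : List (Int × Int)) (sys_to_grt : List (Int × Int × Int × Int)) (out : Bool) : Decidable (Spec_is_full_arg_match grt_args sys_args sys_to_grt out) := by unfold Spec_is_full_arg_match; infer_instance

-- ===== CLAIM (what is proved, stated in full; the proofs are below) =====
def Claim_equal_is_full_arg_match : Prop := ∀ (grt_args : List (Int × Int)) (sys_args : List (Int × Int)) (sys_to_grt : List (Int × Int × Int × Int)), Dom_is_full_arg_match grt_args sys_args sys_to_grt → Spec_is_full_arg_match grt_args sys_args sys_to_grt (is_full_arg_match grt_args sys_args sys_to_grt)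

-- ===== LEMMAS AND PROOFS =====


-- ===== LEMMAS AND PROOFS =====
theorem pvSetLen_eq_iff_nodup {α : Type} [BEq α] [LawfulBEq α] (xs : List α) :
    (PySem.Set.ofList xs).length = xs.length ↔ xs.Nodup := by
  constructor
  · intro h
    induction xs with
    | nil => simp
    | cons x xs ih =>
      rw [PySem.Set.ofList_cons] at h
      simp only [List.length_cons] at h
      have hle1 : ((PySem.Set.ofList xs).discard x).length ≤ (PySem.Set.ofList xs).length :=
        List.length_filter_le _ _
      have hle2 := PySem.Set.length_ofList_le xs
      have hlen : ((PySem.Set.ofList xs).discard x).length = xs.length := by omega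
      have hof : (PySem.Set.ofList xs).length = xs.length := by omega
      have hall : ∀ a ∈ PySem.Set.ofList xs, (!a == x) = true :=
        List.length_filter_eq_length_iff.mp
          (by simpa [PySem.Set.discard] using hlen.trans hof.symm)
      have hx : x ∉ xs := by
        intro hx
        have := hall x ((PySem.Set.mem_ofList _ _).mpr hx)
        simp at this
      exact List.Nodup.cons (fun h' => hx h') (ih hof)
  · intro h
    rw [PySem.Set.ofList_eq_self_of_nodup _ h]

theorem pvLoopA_iff (d : List (Int × Int × Int × Int)) (ss : List (Int × Int)) :
    ∀ S : PySem.Set (Int × Int), S.Nodup →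
      (pvLoopA d ss S = true ↔
        ((ss.map (pvGet d)).Nodup ∧ ∀ o ∈ ss.map (pvGet d), ∃ g, o = some g ∧ g ∈ S)) := by
  induction ss with
  | nil => intro S _; simp [pvLoopA]
  | cons a rest ih =>
    intro S hS
    simp only [pvLoopA, List.map_cons]
    cases hget : pvGet d a with
    | none =>
      simp only [List.nodup_cons, List.mem_cons]
      constructor
      · intro h; cases h
      · rintro ⟨-, hall⟩
        obtain ⟨g, hg, -⟩ := hall none (Or.inl rfl)
        cases hg
    | some g =>
      by_cases hmem : g ∈ S
      · simp only [if_pos hmem]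
        rw [ih (S.discard g) (PySem.Set.nodup_discard S g hS)]
        simp only [List.nodup_cons, List.mem_cons]
        constructor
        · rintro ⟨hnd, hall⟩
          refine ⟨⟨?_, hnd⟩, ?_⟩
          · intro hin
            obtain ⟨g', hg', hmem'⟩ := hall _ hin
            cases hg'
            exact ((PySem.Set.mem_discard S g g).mp hmem').2 rfl
          · rintro o (rfl | ho)
            · exact ⟨g, rfl, hmem⟩
            · obtain ⟨g', hg', hmem'⟩ := hall o ho
              exact ⟨g', hg', ((PySem.Set.mem_discard S g g').mp hmem').1⟩
        · rintro ⟨⟨hni, hnd⟩, hall⟩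
          refine ⟨hnd, ?_⟩
          intro o ho
          obtain ⟨g', hg', hmem'⟩ := hall o (Or.inr ho)
          refine ⟨g', hg', (PySem.Set.mem_discard S g g').mpr ⟨hmem', ?_⟩⟩
          intro hgg
          subst hgg
          exact hni (hg' ▸ ho)
      · simp only [if_neg hmem, List.nodup_cons, List.mem_cons]
        constructor
        · intro h; cases h
        · rintro ⟨-, hall⟩
          obtain ⟨g', hg', hmem'⟩ := hall (some g) (Or.inl rfl)
          cases hg'
          exact absurd hmem' hmem

-- ===== VERDICT (by name: the statement is the Claim_ definition above) =====
theorem is_full_arg_match_spec : Claim_equal_is_full_arg_match := by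
  intro grt_args sys_args sys_to_grt _
  unfold Spec_is_full_arg_match is_full_arg_match is_full_arg_match_alt
  by_cases hlen : grt_args.length ≠ sys_args.length
  · simp [hlen]
  · simp only [if_neg hlen]
    rw [Bool.eq_iff_iff]
    rw [pvLoopA_iff sys_to_grt sys_args (PySem.Set.ofList grt_args)
      (PySem.Set.nodup_ofList grt_args)]
    simp only [Bool.and_eq_true, beq_iff_eq, PySem.Set.issubset_iff]
    constructor
    · rintro ⟨hnd, hall⟩
      refine ⟨(pvSetLen_eq_iff_nodup _).mpr hnd, ?_⟩
      intro o ho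
      obtain ⟨g, rfl, hg⟩ := hall o ((PySem.Set.mem_ofList _ _).mp ho)
      exact (PySem.Set.mem_ofList _ _).mpr
        (List.mem_map.mpr ⟨g, (PySem.Set.mem_ofList _ _).mp hg, rfl⟩)
    · rintro ⟨hlen', hsub⟩
      refine ⟨(pvSetLen_eq_iff_nodup _).mp hlen', ?_⟩
      intro o ho
      have := hsub o ((PySem.Set.mem_ofList _ _).mpr ho)
      obtain ⟨g, hg, rfl⟩ := List.mem_map.mp ((PySem.Set.mem_ofList _ _).mp this)
      exact ⟨g, rfl, (PySem.Set.mem_ofList _ _).mpr hg⟩
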